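-- pv_equiv track=rewrite | github.com/Saibot101/bachelor_thesis | poc/poc.py | add_audio_together
-- ===== SOURCE A (Python) =====
-- def add_audio_together(chunks_function, target_length_function):
--     output_chunks_function = [chunks_function[0]]
--     for chunk in chunks_function[1:]:
--         if len(output_chunks_function[-1]) < target_length_function:
--             output_chunks_function[-1] += chunk
--         else:
--             # if the last output chunk is longer than the target length,
--             # we can start a new one
--             output_chunks_function.append(chunk)
--     return output_chunks_function
-- ===== SOURCE B (Python) =====
-- def add_audio_together(chunks_function, target_length_function):
--     # Pass 1: group chunks, tracking the running length of the current group.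
--     groups = [[chunks_function[0]]]
--     running = len(chunks_function[0])
--     for chunk in chunks_function[1:]:
--         if running < target_length_function:
--             groups[-1].append(chunk)
--             running += len(chunk)
--         else:
--             groups.append([chunk])
--             running = len(chunk)
--     # Pass 2: concatenate each group onto its first element.
--     output = []
--     for g in groups:
--         head = g[0]
--         for c in g[1:]:
--             head += c
--         output.append(head)
--     return output
-- ===== Notes on version B (the rewrite author's own statement) =====
-- stated objective: alternative
-- what changed: B replaces A's single loop that mutates the last element of the output list (re-measuring its length each step) with two passes: a grouping pass maintaining an explicit running length, then a concatenation pass over the groups.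
-- outside the precondition, e.g. on add_audio_together([], 5): A raises IndexError, B raises IndexError
import Mathlib
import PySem

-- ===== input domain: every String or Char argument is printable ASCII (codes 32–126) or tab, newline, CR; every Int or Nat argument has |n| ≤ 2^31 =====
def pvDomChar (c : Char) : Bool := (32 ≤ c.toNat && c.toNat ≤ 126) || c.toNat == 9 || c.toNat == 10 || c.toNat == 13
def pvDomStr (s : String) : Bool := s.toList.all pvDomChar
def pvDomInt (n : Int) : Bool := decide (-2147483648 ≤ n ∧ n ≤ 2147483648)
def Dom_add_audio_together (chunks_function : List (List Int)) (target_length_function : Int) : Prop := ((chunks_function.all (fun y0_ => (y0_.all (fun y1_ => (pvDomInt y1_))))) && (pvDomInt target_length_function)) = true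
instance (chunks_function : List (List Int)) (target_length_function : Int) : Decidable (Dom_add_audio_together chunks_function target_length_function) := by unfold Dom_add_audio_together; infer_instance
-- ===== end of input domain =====

-- B regroups the chunks in two passes (grouping with an explicit running length, then
-- concatenation per group) instead of A's single loop mutating the last output element.
-- Both Pythons mutate chunk objects in place via '+='; the equivalence proved here is
-- about the RETURN value.

-- ===== PORT A =====
-- chunks_function[0] raises IndexError on an empty list: excluded by Pre_.
def add_audio_together (chunks_function : List (List Int)) (target_length_function : Int) : List (List Int) :=
  match chunks_function with
  | [] => []
  | c0 :: rest =>
    rest.foldl (fun acc chunk =>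
      if ((acc.getLast!).length : Int) < target_length_function then
        acc.dropLast ++ [acc.getLast! ++ chunk]
      else
        acc ++ [chunk]) [c0]

-- ===== PORT B =====
-- head = g[0]; for c in g[1:]: head += c   (g is never empty when called)
def pvConcatGroup (g : List (List Int)) : List Int :=
  match g with
  | [] => []
  | h :: tl => tl.foldl (fun head c => head ++ c) h

def add_audio_together_alt (chunks_function : List (List Int)) (target_length_function : Int) : List (List Int) :=
  match chunks_function with
  | [] => []
  | c0 :: rest =>
    let st := rest.foldl (fun (p : List (List (List Int)) × Int) chunk =>
      if p.2 < target_length_function then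
        (p.1.dropLast ++ [p.1.getLast! ++ [chunk]], p.2 + (chunk.length : Int))
      else
        (p.1 ++ [[chunk]], (chunk.length : Int))) ([[c0]], (c0.length : Int))
    st.1.foldl (fun out g => out ++ [pvConcatGroup g]) []

-- ===== PRECONDITION & SPEC =====
-- Pre_ excludes only the empty chunk list, on which A raises IndexError (chunks_function[0]).
def Pre_add_audio_together (chunks_function : List (List Int)) (target_length_function : Int) : Prop :=
  chunks_function ≠ []
instance (chunks_function : List (List Int)) (target_length_function : Int) : Decidable (Pre_add_audio_together chunks_function target_length_function) := by unfold Pre_add_audio_together; infer_instance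

def pvWitness_add_audio_together : List (List Int) × Int := ([[1, 2], [3], [4, 5]], 3)

def Spec_add_audio_together (chunks_function : List (List Int)) (target_length_function : Int) (out : List (List Int)) : Prop := out = add_audio_together_alt chunks_function target_length_function
instance (chunks_function : List (List Int)) (target_length_function : Int) (out : List (List Int)) : Decidable (Spec_add_audio_together chunks_function target_length_function out) := by unfold Spec_add_audio_together; infer_instance

-- ===== CLAIM (what is proved, stated in full; the proofs are below) =====
def Claim_equal_add_audio_together : Prop := ∀ (chunks_function : List (List Int)) (target_length_function : Int), Dom_add_audio_together chunks_function target_length_function → Pre_add_audio_together chunks_function target_length_function → Spec_add_audio_together chunks_function target_length_function (add_audio_together chunks_function target_length_function)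

-- ===== LEMMAS AND PROOFS =====

-- Reference recursion for A's loop: the current (last) output chunk is explicit.
def refA (t : Int) : List (List Int) → List Int → List (List Int)
  | [], cur => [cur]
  | c :: rs, cur =>
    if (cur.length : Int) < t then refA t rs (cur ++ c) else cur :: refA t rs c

-- Reference recursion for B's grouping pass: the current group is explicit.
def refB (t : Int) : List (List Int) → List (List Int) → List (List (List Int))
  | [], curG => [curG]
  | c :: rs, curG =>
    if ((curG.flatten).length : Int) < t then refB t rs (curG ++ [c]) else curG :: refB t rs [c]

-- (acc ++ [cur]).getLast! = cur, not in the library under this name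
theorem pvLast_concat {α : Type} [Inhabited α] (l : List α) (a : α) : (l ++ [a]).getLast! = a := by
  induction l with
  | nil => rfl
  | cons x xs ih => simp [List.getLast!, List.getLast_append]

theorem foldl_append_flatten (tl : List (List Int)) (h : List Int) :
    tl.foldl (fun head c => head ++ c) h = h ++ tl.flatten := by
  induction tl generalizing h with
  | nil => simp
  | cons c rs ih => simp [List.foldl, ih, List.append_assoc]

theorem pvConcatGroup_eq_flatten (g : List (List Int)) : pvConcatGroup g = g.flatten := by
  cases g with
  | nil => rfl
  | cons h tl => simp [pvConcatGroup, foldl_append_flatten tl h]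

theorem second_pass_eq_map (groups : List (List (List Int))) (out : List (List Int)) :
    groups.foldl (fun out g => out ++ [pvConcatGroup g]) out = out ++ groups.map pvConcatGroup := by
  induction groups generalizing out with
  | nil => simp
  | cons g gs ih => simp [List.foldl, ih, List.append_assoc]

theorem foldlA_eq_refA (t : Int) (rest : List (List Int)) :
    ∀ (done : List (List Int)) (cur : List Int),
      rest.foldl (fun acc chunk =>
        if ((acc.getLast!).length : Int) < t then
          acc.dropLast ++ [acc.getLast! ++ chunk]
        else acc ++ [chunk]) (done ++ [cur]) = done ++ refA t rest cur := by
  induction rest with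
  | nil => intro done cur; simp [refA]
  | cons c rs ih =>
    intro done cur
    simp only [List.foldl, refA, pvLast_concat, List.dropLast_concat]
    by_cases h : (cur.length : Int) < t
    · rw [if_pos h, if_pos h]
      exact ih done (cur ++ c)
    · rw [if_neg h, if_neg h]
      have := ih (done ++ [cur]) c
      simpa only [List.append_assoc, List.singleton_append] using this

theorem foldlB_eq_refB (t : Int) (rest : List (List Int)) :
    ∀ (doneG : List (List (List Int))) (curG : List (List Int)),
      (rest.foldl (fun (p : List (List (List Int)) × Int) chunk =>
        if p.2 < t then
          (p.1.dropLast ++ [p.1.getLast! ++ [chunk]], p.2 + (chunk.length : Int))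
        else
          (p.1 ++ [[chunk]], (chunk.length : Int)))
        (doneG ++ [curG], ((curG.flatten).length : Int))).1
      = doneG ++ refB t rest curG := by
  induction rest with
  | nil => intro doneG curG; simp [refB]
  | cons c rs ih =>
    intro doneG curG
    simp only [List.foldl, refB, pvLast_concat, List.dropLast_concat]
    by_cases h : ((curG.flatten).length : Int) < t
    · rw [if_pos h, if_pos h]
      have hlen : ((curG.flatten).length : Int) + (c.length : Int)
          = (((curG ++ [c]).flatten).length : Int) := by
        rw [List.flatten_append]; simp [List.length_append]
      rw [hlen]
      simpa only [List.append_assoc, List.singleton_append] using ih doneG (curG ++ [c])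
    · rw [if_neg h, if_neg h]
      have hc : ((c.length : Int)) = ((([c] : List (List Int)).flatten).length : Int) := by simp
      rw [hc]
      have := ih (doneG ++ [curG]) [c]
      simpa only [List.append_assoc, List.singleton_append] using this

theorem map_flatten_refB (t : Int) (rest : List (List Int)) :
    ∀ (curG : List (List Int)),
      (refB t rest curG).map List.flatten = refA t rest curG.flatten := by
  induction rest with
  | nil => intro curG; simp [refA, refB]
  | cons c rs ih =>
    intro curG
    simp only [refA, refB]
    by_cases h : ((curG.flatten).length : Int) < t
    · rw [if_pos h, if_pos h]
      have := ih (curG ++ [c])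
      rw [List.flatten_append] at this
      simpa using this
    · rw [if_neg h, if_neg h]
      have := ih [c]
      simp only [List.map_cons, this]
      simp

-- ===== VERDICT (by name: the statement is the Claim_ definition above) =====
theorem add_audio_together_spec : Claim_equal_add_audio_together := by
  intro chunks t _ hpre
  unfold Spec_add_audio_together
  match chunks with
  | [] => exact absurd rfl hpre
  | c0 :: rest =>
    show add_audio_together (c0 :: rest) t = add_audio_together_alt (c0 :: rest) t
    have hA : add_audio_together (c0 :: rest) t = refA t rest c0 := by
      have := foldlA_eq_refA t rest [] c0
      simpa [add_audio_together] using this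
    have hB : add_audio_together_alt (c0 :: rest) t = refA t rest c0 := by
      have hfold := foldlB_eq_refB t rest [] [c0]
      simp only [List.nil_append] at hfold
      have : add_audio_together_alt (c0 :: rest) t
          = ((refB t rest [c0]).map pvConcatGroup) := by
        simp only [add_audio_together_alt]
        rw [second_pass_eq_map]
        simp only [List.nil_append]
        congr 1
        simpa using hfold
      rw [this]
      have hmap : (refB t rest [c0]).map pvConcatGroup = (refB t rest [c0]).map List.flatten := by
        apply List.map_congr_left; intro g _; exact pvConcatGroup_eq_flatten g
      rw [hmap]
      simpa using map_flatten_refB t rest [c0]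
    rw [hA, hB]
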